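-- pv_equiv track=rewrite | github.com/gamba14/JuanitoyLosClonosaurios | tp1_ssl.py | parseValues
-- ===== SOURCE A (Python) =====
-- def parseValues(string):
--     """Parse values separed by ',' """
--     values = []
--
--     aux = ''
--     for c in string:
--         if c == ',':
--             if aux.strip() != '':
--                 values.append(aux.strip())
--
--             aux = ''
--         else:
--             aux += c
--
--     return values
-- ===== SOURCE B (Python) =====
-- def parseValues(string):
--     """Parse values separed by ',' """
--     return [s.strip() for s in string.split(',')[:-1] if s.strip()]
-- ===== Notes on version B (the rewrite author's own statement) =====
-- stated objective: simpler
-- what changed: Replaces the char-by-char buffer-accumulation state machine with a one-line split-then-filter: split on the separator, drop the unflushed trailing segment, strip and keep non-empty segments (split runs at C speed instead of a Python-level per-character loop).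
import Mathlib
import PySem

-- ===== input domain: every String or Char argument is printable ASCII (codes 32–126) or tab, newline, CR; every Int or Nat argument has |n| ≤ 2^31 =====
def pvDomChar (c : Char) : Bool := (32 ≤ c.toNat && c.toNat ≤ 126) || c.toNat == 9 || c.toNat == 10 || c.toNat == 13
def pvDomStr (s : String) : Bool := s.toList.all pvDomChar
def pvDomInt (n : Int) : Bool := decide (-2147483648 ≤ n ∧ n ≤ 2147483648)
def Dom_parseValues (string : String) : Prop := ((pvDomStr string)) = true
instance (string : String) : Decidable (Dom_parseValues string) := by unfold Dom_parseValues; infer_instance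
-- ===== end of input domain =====

-- B replaces A's char-by-char buffer-accumulation state machine with a split-then-filter
-- one-liner (split on ',', drop the trailing unflushed segment, strip and keep non-empty).


-- ===== PORT A =====
-- state = (values, aux); one step per character, flushing the stripped buffer at each ','
def pvStepA (st : List String × List Char) (c : Char) : List String × List Char :=
  if c = ',' then
    (if PySem.Chars.strip st.2 ≠ [] then st.1 ++ [String.ofList (PySem.Chars.strip st.2)] else st.1, [])
  else (st.1, st.2 ++ [c])

def parseValues (string : String) : List String :=
  (string.toList.foldl pvStepA ([], [])).1

-- ===== PORT B =====
-- `if s.strip(): yield s.strip()` of the comprehension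
def pvEmitB (s : List Char) : Option String :=
  if PySem.Chars.strip s = [] then none else some (String.ofList (PySem.Chars.strip s))

def parseValues_alt (string : String) : List String :=
  (PySem.List.slice (PySem.Chars.splitOn string.toList [',']) none (some (-1))).filterMap pvEmitB

-- ===== PRECONDITION & SPEC =====
def Spec_parseValues (string : String) (out : List String) : Prop := out = parseValues_alt string
instance (string : String) (out : List String) : Decidable (Spec_parseValues string out) := by unfold Spec_parseValues; infer_instance

-- ===== CLAIM (what is proved, stated in full; the proofs are below) =====
def Claim_equal_parseValues : Prop := ∀ (string : String), Dom_parseValues string → Spec_parseValues string (parseValues string)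

-- ===== LEMMAS AND PROOFS =====

-- reference single-char splitter, used only by the proofs
def pvSplit : List Char → List (List Char)
  | [] => [[]]
  | c :: cs => if c = ',' then [] :: pvSplit cs else (c :: (pvSplit cs).headI) :: (pvSplit cs).tail

lemma pvSplit_ne_nil (cs : List Char) : pvSplit cs ≠ [] := by
  cases cs with
  | nil => simp [pvSplit]
  | cons c cs => by_cases h : c = ',' <;> simp [pvSplit, h]

lemma pvSplit_cons_headI_tail (cs : List Char) :
    (pvSplit cs).headI :: (pvSplit cs).tail = pvSplit cs := by
  cases h : pvSplit cs with
  | nil => exact absurd h (pvSplit_ne_nil cs)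
  | cons a t => simp

lemma go_eq_pvSplit (l : List Char) (fuel : Nat) (h : l.length ≤ fuel)
    (cur : List Char) (acc : List (List Char)) :
    PySem.Chars.splitOn.go [','] fuel l cur acc =
      acc.reverse ++ (cur.reverse ++ (pvSplit l).headI) :: (pvSplit l).tail := by
  induction fuel generalizing l cur acc with
  | zero =>
    have : l = [] := by cases l <;> simp_all
    subst this
    simp [PySem.Chars.splitOn.go, pvSplit]
  | succ fuel ih =>
    cases l with
    | nil => simp [PySem.Chars.splitOn.go, pvSplit]
    | cons c rest =>
      by_cases hc : c = ','
      · subst hc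
        have hpre : List.isPrefixOf [','] (',' :: rest) = true := by
          simp [List.isPrefixOf]
        rw [show PySem.Chars.splitOn.go [','] (fuel+1) (',' :: rest) cur acc =
              PySem.Chars.splitOn.go [','] fuel rest [] (cur.reverse :: acc) by
            simp [PySem.Chars.splitOn.go, hpre]]
        rw [ih rest (by simpa using Nat.le_of_succ_le_succ h) [] (cur.reverse :: acc)]
        simp [pvSplit, pvSplit_cons_headI_tail]
      · have hpre : List.isPrefixOf [','] (c :: rest) = false := by
          simp [List.isPrefixOf]; exact fun hh => hc hh.symm
        rw [show PySem.Chars.splitOn.go [','] (fuel+1) (c :: rest) cur acc =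
              PySem.Chars.splitOn.go [','] fuel rest (c :: cur) acc by
            simp [PySem.Chars.splitOn.go, hpre]]
        rw [ih rest (by simpa using Nat.le_of_succ_le_succ h) (c :: cur) acc]
        simp [pvSplit, hc]

lemma splitOn_eq_pvSplit (cs : List Char) :
    PySem.Chars.splitOn cs [','] = pvSplit cs := by
  rw [show PySem.Chars.splitOn cs [','] = PySem.Chars.splitOn.go [','] (cs.length + 1) cs [] []
        from rfl]
  rw [go_eq_pvSplit cs (cs.length + 1) (by omega) [] []]
  simpa using pvSplit_cons_headI_tail cs

lemma pvSplit_comma_free (aux : List Char) (h : ',' ∉ aux) : pvSplit aux = [aux] := by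
  induction aux with
  | nil => simp [pvSplit]
  | cons a t ih =>
    have ha : a ≠ ',' := fun hh => h (hh ▸ List.mem_cons_self)
    simp [pvSplit, ha, ih (fun hm => h (List.mem_cons_of_mem _ hm))]

lemma pvSplit_append_comma (aux cs : List Char) (h : ',' ∉ aux) :
    pvSplit (aux ++ ',' :: cs) = aux :: pvSplit cs := by
  induction aux with
  | nil => simp [pvSplit]
  | cons a t ih =>
    have ha : a ≠ ',' := fun hh => h (hh ▸ List.mem_cons_self)
    simp [pvSplit, ha, ih (fun hm => h (List.mem_cons_of_mem _ hm))]

lemma foldl_pvStepA (cs : List Char) (vals : List String) (aux : List Char) (h : ',' ∉ aux) :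
    (cs.foldl pvStepA (vals, aux)).1 =
      vals ++ ((pvSplit (aux ++ cs)).dropLast).filterMap pvEmitB := by
  induction cs generalizing vals aux with
  | nil => simp [pvSplit_comma_free aux h]
  | cons c cs ih =>
    by_cases hc : c = ','
    · subst hc
      rw [show (',' :: cs).foldl pvStepA (vals, aux) =
            cs.foldl pvStepA
              (if PySem.Chars.strip aux ≠ [] then vals ++ [String.ofList (PySem.Chars.strip aux)]
               else vals, []) by simp [pvStepA]]
      rw [pvSplit_append_comma aux cs h]
      have hne := pvSplit_ne_nil cs
      rw [List.dropLast_cons_of_ne_nil hne, List.filterMap_cons]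
      by_cases hs : PySem.Chars.strip aux = []
      · simp only [hs, ne_eq, not_true_eq_false, if_false, pvEmitB]
        rw [ih vals [] (by simp)]
        simp [pvEmitB]
      · simp only [ne_eq, hs, not_false_eq_true, if_true, pvEmitB]
        rw [ih (vals ++ [String.ofList (PySem.Chars.strip aux)]) [] (by simp)]
        simp [pvEmitB]
    · rw [show (c :: cs).foldl pvStepA (vals, aux) =
            cs.foldl pvStepA (vals, aux ++ [c]) by simp [pvStepA, hc]]
      rw [ih vals (aux ++ [c]) (by simp [h, Ne.symm hc])]
      simp

-- ===== VERDICT (by name: the statement is the Claim_ definition above) =====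
theorem parseValues_spec : Claim_equal_parseValues := by
  intro s _
  show parseValues s = parseValues_alt s
  rw [parseValues, parseValues_alt, PySem.List.slice_to_neg_one, splitOn_eq_pvSplit,
    foldl_pvStepA s.toList [] [] (by simp)]
  simp
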